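-- pv_equiv track=rewrite | github.com/shezi/airmtp | rename.py | isSpecifierInFormatString
-- ===== SOURCE A (Python) =====
-- class GenerateReplacementNameException(Exception):
-- 		def __init__(self, message):
-- 			Exception.__init__(self, message)
--
-- def getNextSpecifierPos(formatString, formatStringPos):
-- 	nextSpecifierStartPos = formatString.find('@', formatStringPos)
-- 	if nextSpecifierStartPos == -1:
-- 		# no more specifiers
-- 		return (-1, -1)
-- 	#
-- 	# find end of the specifier
-- 	#
-- 	nextSpecifierEndPos = formatString.find('@', nextSpecifierStartPos+1)
-- 	if nextSpecifierEndPos == -1: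
-- 		raise GenerateReplacementNameException("Missing specifier after @ at character #{:d}".format(nextSpecifierStartPos))
--
-- 	return (nextSpecifierStartPos, nextSpecifierEndPos)
--
-- def isSpecifierInFormatString(formatString, specifierName):
-- 	specifierName = specifierName.lower() # for case-insensitive match
-- 	formatStringLen = len(formatString)
-- 	formatStringPos = 0
-- 	while formatStringPos < formatStringLen:
-- 		# find next specifier
-- 		(nextSpecifierStartPos, nextSpecifierEndPos) = getNextSpecifierPos(formatString, formatStringPos)
-- 		if nextSpecifierStartPos == -1:
-- 			return False
-- 		specifierWithArgs = formatString[nextSpecifierStartPos+1:nextSpecifierEndPos]		# the entire specifier with optional args included (everything between @@)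
-- 		specifierList = specifierWithArgs.split(':')
-- 		speciferName = specifierList[0].lower()
-- 		if speciferName == specifierName:
-- 			return True
-- 		formatStringPos = nextSpecifierEndPos+1 # advance past specifier for next loop iteration
-- 	return False
-- ===== SOURCE B (Python) =====
-- class GenerateReplacementNameException(Exception):
-- 	def __init__(self, message):
-- 		Exception.__init__(self, message)
--
-- def isSpecifierInFormatString(formatString, specifierName):
-- 	target = specifierName.lower()
-- 	parts = formatString.split('@')
-- 	nats = len(parts) - 1  # number of '@' characters
-- 	for i in range(nats // 2):
-- 		if parts[2 * i + 1].split(':')[0].lower() == target: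
-- 			return True
-- 	if nats % 2 == 1:
-- 		raise GenerateReplacementNameException("Missing specifier after @ at character #{:d}".format(formatString.rfind('@')))
-- 	return False
-- ===== Notes on version B (the rewrite author's own statement) =====
-- stated objective: simpler
-- what changed: B splits the whole format string on '@' once and checks the odd-indexed tokens, replacing A's stateful find/advance position scan; the parity check after the loop reproduces A's exception (same message, position = rfind('@')).
import Mathlib
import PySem

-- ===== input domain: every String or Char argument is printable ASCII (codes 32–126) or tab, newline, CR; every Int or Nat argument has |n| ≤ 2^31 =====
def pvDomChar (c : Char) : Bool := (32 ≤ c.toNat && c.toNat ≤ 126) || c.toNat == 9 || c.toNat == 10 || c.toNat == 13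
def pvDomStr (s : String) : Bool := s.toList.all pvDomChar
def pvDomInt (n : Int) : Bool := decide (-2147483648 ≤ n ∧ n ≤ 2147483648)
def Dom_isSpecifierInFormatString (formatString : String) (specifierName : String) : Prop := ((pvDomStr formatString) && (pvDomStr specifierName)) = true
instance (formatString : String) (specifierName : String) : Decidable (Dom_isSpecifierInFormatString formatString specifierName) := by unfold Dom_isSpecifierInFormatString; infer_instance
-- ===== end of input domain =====

-- B replaces A's stateful find/advance position scan by one split on '@' plus a check of the
-- odd-indexed tokens; equal on Pre_ (where A returns; where A raises, B raises the same exception).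

-- ===== PORT A =====
-- breakAtAmp cs = some (before, after) splits cs at its FIRST '@' (none if there is no '@'):
-- exact port of formatString.find('@', pos) together with the slices formatString[...] around it,
-- carried on the remaining suffix instead of an absolute position.
def breakAtAmp : List Char → Option (List Char × List Char)
  | [] => none
  | c :: rest =>
    if c = '@' then some ([], rest)
    else
      match breakAtAmp rest with
      | none => none
      | some (a, b) => some (c :: a, b)

theorem breakAtAmp_len {cs a b : List Char} (h : breakAtAmp cs = some (a, b)) :
    b.length < cs.length := by
  induction cs generalizing a b with
  | nil => simp [breakAtAmp] at h
  | cons c rest ih =>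
    by_cases hc : c = '@'
    · simp [breakAtAmp, hc] at h
      obtain ⟨rfl, rfl⟩ := h
      simp
    · simp only [breakAtAmp, if_neg hc] at h
      cases hr : breakAtAmp rest with
      | none => rw [hr] at h; simp at h
      | some p =>
        rw [hr] at h
        cases p with
        | mk a' b' =>
          simp at h
          have := ih hr
          simp [← h.2]
          omega

-- the while loop of A, one call per iteration; the raise branch
-- (GenerateReplacementNameException, no closing '@') is excluded by Pre_ and returns false here
def scanA (spec : List Char) (cs : List Char) : Bool :=
  match h1 : breakAtAmp cs with
  | none => false                                  -- nextSpecifierStartPos == -1: return False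
  | some (_, afterStart) =>
    match h2 : breakAtAmp afterStart with
    | none => false                                -- Python: raise GenerateReplacementNameException (outside Pre_)
    | some (between, afterEnd) =>
      if PySem.Chars.lower ((between.splitOn ':').headD []) = spec then true
      else scanA spec afterEnd
termination_by cs.length
decreasing_by
  exact Nat.lt_trans (breakAtAmp_len h2) (breakAtAmp_len h1)

def isSpecifierInFormatString (formatString : String) (specifierName : String) : Bool :=
  scanA (PySem.Chars.lower specifierName.toList) formatString.toList

-- ===== PORT B =====
def isSpecifierInFormatString_alt (formatString : String) (specifierName : String) : Bool :=
  let target := PySem.Chars.lower specifierName.toList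
  let parts := formatString.toList.splitOn '@'
  let nats := parts.length - 1
  -- for i in range(nats // 2): return True on a match; the trailing odd-parity raise is outside Pre_
  (List.range (nats / 2)).any (fun i =>
    PySem.Chars.lower (((parts.getD (2 * i + 1) []).splitOn ':').headD []) == target)

-- ===== PRECONDITION & SPEC =====
-- Pre_ excludes exactly the inputs where A raises GenerateReplacementNameException (an odd
-- number of '@' with no match among the complete '@…@' pairs); B raises the same exception there.
def Pre_isSpecifierInFormatString (formatString : String) (specifierName : String) : Prop :=
  ((formatString.toList.splitOn '@').length - 1) % 2 = 0 ∨
    ∃ i < ((formatString.toList.splitOn '@').length - 1) / 2,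
      PySem.Chars.lower ((((formatString.toList.splitOn '@').getD (2 * i + 1) []).splitOn ':').headD [])
        = PySem.Chars.lower specifierName.toList
instance (formatString : String) (specifierName : String) : Decidable (Pre_isSpecifierInFormatString formatString specifierName) := by unfold Pre_isSpecifierInFormatString; infer_instance

def pvWitness_isSpecifierInFormatString : String × String := ("img_@d@.jpg", "D")

def Spec_isSpecifierInFormatString (formatString : String) (specifierName : String) (out : Bool) : Prop := out = isSpecifierInFormatString_alt formatString specifierName
instance (formatString : String) (specifierName : String) (out : Bool) : Decidable (Spec_isSpecifierInFormatString formatString specifierName out) := by unfold Spec_isSpecifierInFormatString; infer_instance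

-- ===== CLAIM (what is proved, stated in full; the proofs are below) =====
def Claim_equal_isSpecifierInFormatString : Prop := ∀ (formatString : String) (specifierName : String), Dom_isSpecifierInFormatString formatString specifierName → Pre_isSpecifierInFormatString formatString specifierName → Spec_isSpecifierInFormatString formatString specifierName (isSpecifierInFormatString formatString specifierName)

-- ===== LEMMAS AND PROOFS =====

-- B's loop abstracted over the token list, for the induction
def bAny (spec : List Char) (parts : List (List Char)) : Bool :=
  (List.range ((parts.length - 1) / 2)).any (fun i =>
    PySem.Chars.lower (((parts.getD (2 * i + 1) []).splitOn ':').headD []) == spec)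

theorem breakAtAmp_none {cs : List Char} (h : breakAtAmp cs = none) : ∀ x ∈ cs, x ≠ '@' := by
  induction cs with
  | nil => simp
  | cons c rest ih =>
    by_cases hc : c = '@'
    · simp [breakAtAmp, hc] at h
    · simp only [breakAtAmp, if_neg hc] at h
      cases hr : breakAtAmp rest with
      | none => simpa [hc] using ih hr
      | some p => rw [hr] at h; cases p; simp at h

theorem breakAtAmp_some {cs a b : List Char} (h : breakAtAmp cs = some (a, b)) :
    cs = a ++ '@' :: b ∧ ∀ x ∈ a, x ≠ '@' := by
  induction cs generalizing a b with
  | nil => simp [breakAtAmp] at h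
  | cons c rest ih =>
    by_cases hc : c = '@'
    · simp [breakAtAmp, hc] at h
      obtain ⟨rfl, rfl⟩ := h
      simp [hc]
    · simp only [breakAtAmp, if_neg hc] at h
      cases hr : breakAtAmp rest with
      | none => rw [hr] at h; simp at h
      | some p =>
        rw [hr] at h
        cases p with
        | mk a' b' =>
          simp at h
          obtain ⟨rfl, rfl⟩ := h
          obtain ⟨h1, h2⟩ := ih hr
          refine ⟨by simp [h1], ?_⟩
          intro x hx
          rcases List.mem_cons.mp hx with rfl | hx
          · exact hc
          · exact h2 x hx

-- unfolding equations for scanA, one per branch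
theorem scanA_none {spec cs : List Char} (h : breakAtAmp cs = none) :
    scanA spec cs = false := by
  rw [scanA.eq_def, h]

theorem scanA_step {spec cs pre rest mid rest2 : List Char}
    (h1 : breakAtAmp cs = some (pre, rest)) (h2 : breakAtAmp rest = some (mid, rest2)) :
    scanA spec cs =
      if PySem.Chars.lower ((mid.splitOn ':').headD []) = spec then true
      else scanA spec rest2 := by
  rw [scanA.eq_def, h1]
  split
  next heq => simp at heq
  next a r heq =>
    simp at heq
    obtain ⟨rfl, rfl⟩ := heq
    split
    next heq2 => rw [h2] at heq2; simp at heq2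
    next b r2 heq2 =>
      rw [h2] at heq2
      simp at heq2
      obtain ⟨rfl, rfl⟩ := heq2
      rfl

theorem scanA_eq (spec : List Char) : ∀ (n : Nat) (cs : List Char), cs.length ≤ n →
    ((cs.splitOn '@').length - 1) % 2 = 0 ∨ bAny spec (cs.splitOn '@') = true →
    scanA spec cs = bAny spec (cs.splitOn '@') := by
  intro n
  induction n with
  | zero =>
    intro cs hlen _
    have hnil : cs = [] := List.eq_nil_of_length_eq_zero (Nat.le_zero.mp hlen)
    subst hnil
    rw [scanA_none (by rfl)]
    simp [bAny]
  | succ n ih =>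
    intro cs hlen hpre
    cases h1 : breakAtAmp cs with
    | none =>
      have hfree := breakAtAmp_none h1
      have hsingle : cs.splitOn '@' = [cs] :=
        List.splitOnP_eq_single (· == '@') cs (by intro x hx; simpa using hfree x hx)
      rw [scanA_none h1, hsingle]
      simp [bAny]
    | some p =>
      obtain ⟨pre, rest⟩ := p
      obtain ⟨hcs, hprefree⟩ := breakAtAmp_some h1
      have hsplit1 : cs.splitOn '@' = pre :: rest.splitOn '@' := by
        rw [hcs]
        exact List.splitOnP_first (· == '@') pre (by intro x hx; simpa using hprefree x hx) '@'
          (by simp) rest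
      cases h2 : breakAtAmp rest with
      | none =>
        -- the raise branch: the precondition rules it out
        have hrfree := breakAtAmp_none h2
        have hsingle : rest.splitOn '@' = [rest] :=
          List.splitOnP_eq_single (· == '@') rest (by intro x hx; simpa using hrfree x hx)
        rw [hsplit1, hsingle] at hpre
        simp [bAny] at hpre
      | some q =>
        obtain ⟨mid, rest2⟩ := q
        obtain ⟨hrest, hmidfree⟩ := breakAtAmp_some h2
        have hsplit2 : rest.splitOn '@' = mid :: rest2.splitOn '@' := by
          rw [hrest]
          exact List.splitOnP_first (· == '@') mid (by intro x hx; simpa using hmidfree x hx) '@'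
            (by simp) rest2
        set parts2 := rest2.splitOn '@' with hp2
        have hp2ne : parts2 ≠ [] := by rw [hp2]; exact List.splitOnP_ne_nil _ _
        have hp2len : 1 ≤ parts2.length := List.length_pos_iff.mpr hp2ne
        have hparts : cs.splitOn '@' = pre :: mid :: parts2 := by rw [hsplit1, hsplit2]
        have hstep : bAny spec (pre :: mid :: parts2)
            = ((PySem.Chars.lower ((mid.splitOn ':').headD []) == spec)
               || bAny spec parts2) := by
          have hlen2 : ((pre :: mid :: parts2).length - 1) / 2 = (parts2.length - 1) / 2 + 1 := by
            simp only [List.length_cons]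
            omega
          have hfun : ∀ i : Nat,
              (pre :: mid :: parts2).getD (2 * (i + 1) + 1) ([] : List Char)
                = parts2.getD (2 * i + 1) [] := by
            intro i
            have h3 : 2 * (i + 1) + 1 = (2 * i + 1) + 1 + 1 := by ring
            rw [h3, List.getD_cons_succ, List.getD_cons_succ]
          rw [bAny, hlen2, List.range_succ_eq_map, List.any_cons, List.any_map]
          simp only [Function.comp_def, Nat.succ_eq_add_one, hfun]
          rw [bAny]
          norm_num
        rw [scanA_step h1 h2, hparts, hstep]
        by_cases hm : PySem.Chars.lower ((mid.splitOn ':').headD []) = spec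
        · have hbeq : (PySem.Chars.lower ((mid.splitOn ':').headD []) == spec) = true := beq_iff_eq.mpr hm
          rw [if_pos hm, hbeq, Bool.true_or]
        · have hne : (PySem.Chars.lower ((mid.splitOn ':').headD []) == spec) = false := beq_eq_false_iff_ne.mpr hm
          rw [if_neg hm, hne, Bool.false_or]
          have hlenr : rest2.length ≤ n := by
            have ha := breakAtAmp_len h1
            have hb := breakAtAmp_len h2
            omega
          apply ih rest2 hlenr
          rw [hparts] at hpre
          rcases hpre with hpar | hany
          · left
            rw [← hp2]
            simp only [List.length_cons] at hpar ⊢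
            omega
          · right
            rw [← hp2]
            rw [hstep, hne, Bool.false_or] at hany
            exact hany

-- bAny restated as the ∃ of Pre_
theorem bAny_iff (spec : List Char) (parts : List (List Char)) :
    bAny spec parts = true ↔
      ∃ i < (parts.length - 1) / 2,
        PySem.Chars.lower (((parts.getD (2 * i + 1) []).splitOn ':').headD []) = spec := by
  simp [bAny, List.any_eq_true]

-- ===== VERDICT (by name: the statement is the Claim_ definition above) =====
theorem isSpecifierInFormatString_spec : Claim_equal_isSpecifierInFormatString := by
  intro fs sp _ hpre
  show isSpecifierInFormatString fs sp = isSpecifierInFormatString_alt fs sp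
  have halt : isSpecifierInFormatString_alt fs sp
      = bAny (PySem.Chars.lower sp.toList) (fs.toList.splitOn '@') := rfl
  rw [halt]
  unfold Pre_isSpecifierInFormatString at hpre
  refine scanA_eq _ fs.toList.length _ le_rfl ?_
  rcases hpre with h | h
  · exact Or.inl h
  · exact Or.inr ((bAny_iff _ _).mpr h)
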